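-- pv_equiv track=rewrite | github.com/edeprince3/super_coding_fun_time | advent_of_code/2023/day3/main.py | number_to_left
-- ===== SOURCE A (Python) =====
-- def number_to_left(row, col, adjacent_numbers, numbers, lines) :
--
--     # to left?
--     if col > 0 :
--         if lines[row][col-1] in numbers :
--
--             # where does this number start?
--             digits = []
--             for i in range (col-1, -1, -1):
--                 if lines[row][i] not in numbers :
--                     break
--                 else :
--                     digits.append(lines[row][i])
--             digits.reverse()
--
--             my_number = 0
--             for digit in range (0, len(digits)) :
--                 my_number += int(digits[digit]) * pow(10, len(digits) - digit - 1)
--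
--             adjacent_numbers.append(my_number)
--
--     return adjacent_numbers
-- ===== SOURCE B (Python) =====
-- def number_to_left(row, col, adjacent_numbers, numbers, lines):
--     # Single forward pass over the prefix ending at col: track where the current
--     # run of number-characters starts, then fold that run into a value (Horner).
--     if col > 0:
--         prefix = lines[row][:col]
--         start = 0
--         for i, ch in enumerate(prefix):
--             if ch not in numbers:
--                 start = i + 1
--         if start < len(prefix):
--             value = 0
--             for ch in prefix[start:]:
--                 value = 10 * value + int(ch)
--             adjacent_numbers.append(value)
--     return adjacent_numbers
-- ===== Notes on version B (the rewrite author's own statement) =====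
-- stated objective: simpler
-- what changed: A scans char-by-char leftwards from col-1 with a break, collects digits into a list and sums digit*10^k positional powers; B makes one forward pass over the prefix line[:col] to find where the final run of number-characters starts, then folds that run slice into the value with Horner's rule; Pre_ excludes exactly the inputs where A raises (row out of range or col-1 past the end of the line: IndexError; a non-digit member character inside the run ending at col-1: ValueError from int()).
import Mathlib
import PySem

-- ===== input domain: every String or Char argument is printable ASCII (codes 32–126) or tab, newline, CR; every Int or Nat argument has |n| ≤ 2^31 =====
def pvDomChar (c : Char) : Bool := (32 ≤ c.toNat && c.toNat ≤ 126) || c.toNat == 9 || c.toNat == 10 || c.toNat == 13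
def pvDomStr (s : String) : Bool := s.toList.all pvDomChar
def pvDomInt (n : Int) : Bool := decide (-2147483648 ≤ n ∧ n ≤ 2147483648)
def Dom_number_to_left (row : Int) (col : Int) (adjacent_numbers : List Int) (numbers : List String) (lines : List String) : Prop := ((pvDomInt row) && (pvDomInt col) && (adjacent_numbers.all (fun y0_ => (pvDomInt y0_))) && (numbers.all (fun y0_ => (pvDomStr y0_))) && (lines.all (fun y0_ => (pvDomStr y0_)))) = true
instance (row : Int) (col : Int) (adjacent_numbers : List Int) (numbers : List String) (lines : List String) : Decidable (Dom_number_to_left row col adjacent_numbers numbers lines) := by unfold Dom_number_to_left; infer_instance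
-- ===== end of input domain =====

-- B replaces A's backward char-by-char scan with one forward pass locating the run start
-- plus a Horner fold over the run (objective: simpler; return-value equivalence only —
-- the Python programs append to `adjacent_numbers` in place).

-- `c in numbers` for a single character c of the line (used by both Pythons verbatim)
def memNum (numbers : List String) (c : Char) : Bool := numbers.contains (String.singleton c)

-- `int(ch)` for a single character ch (default irrelevant: only reached inside Pre_)
def intChar (c : Char) : Int := (PySem.Int.ofStr? (String.singleton c)).getD 0

-- ===== PORT A =====
-- the `for i in range(col-1, -1, -1)` loop with its break, collecting digits
def ntlDigits (cs : List Char) (numbers : List String) : List Int → List Char → List Char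
  | [], digits => digits
  | i :: rest, digits =>
    match PySem.List.pyGet? cs i with
    | none => digits          -- IndexError: unreachable inside Pre_
    | some ch =>
      if memNum numbers ch then ntlDigits cs numbers rest (digits ++ [ch])
      else digits             -- break

-- the `for digit in range(0, len(digits))` positional-power accumulation
def ntlValue (digits : List Char) : Int :=
  (PySem.List.pyRange 0 (digits.length) 1).foldl
    (fun my d =>
      my + intChar ((PySem.List.pyGet? digits d).getD ' ')
             * 10 ^ (((digits.length : Int) - d - 1).toNat)) 0

def number_to_left (row : Int) (col : Int) (adjacent_numbers : List Int) (numbers : List String) (lines : List String) : List Int :=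
  if col > 0 then
    match PySem.List.pyGet? lines row with
    | none => adjacent_numbers        -- IndexError: excluded by Pre_
    | some lineRow =>
      match PySem.Str.pyGet? lineRow (col - 1) with
      | none => adjacent_numbers      -- IndexError: excluded by Pre_
      | some c =>
        if memNum numbers c then
          let digits := ntlDigits lineRow.toList numbers (PySem.List.pyRange (col - 1) (-1) (-1)) []
          adjacent_numbers ++ [ntlValue digits.reverse]
        else adjacent_numbers
  else adjacent_numbers

-- ===== PORT B =====
def number_to_left_alt (row : Int) (col : Int) (adjacent_numbers : List Int) (numbers : List String) (lines : List String) : List Int :=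
  if col > 0 then
    match PySem.List.pyGet? lines row with
    | none => adjacent_numbers        -- IndexError: excluded by Pre_
    | some lineRow =>
      let pre := PySem.List.slice lineRow.toList none (some col)
      let start := (PySem.List.enumerate pre).foldl
        (fun start p => if memNum numbers p.2 = false then p.1 + 1 else start) 0
      if start < (pre.length : Int) then
        let value := (PySem.List.slice pre (some start) none).foldl
          (fun value ch => 10 * value + intChar ch) 0
        adjacent_numbers ++ [value]
      else adjacent_numbers
  else adjacent_numbers

-- ===== PRECONDITION & SPEC =====
-- Pre_ excludes exactly the inputs where the Python A raises: an out-of-range row,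
-- col-1 beyond the end of the line (IndexError), or a non-digit character inside the
-- run of `numbers`-characters ending at col-1 (ValueError from int()).
def Pre_number_to_left (row : Int) (col : Int) (adjacent_numbers : List Int) (numbers : List String) (lines : List String) : Prop :=
  0 < col →
    (PySem.List.pyGet? lines row).isSome = true ∧
    (col - 1).toNat < ((PySem.List.pyGet? lines row).getD "").toList.length ∧
    (∀ i : Nat, i < (col - 1).toNat + 1 →
      (∀ j : Nat, j < (col - 1).toNat + 1 → i ≤ j →
        memNum numbers (((PySem.List.pyGet? lines row).getD "").toList.getD j ' ') = true) →
      (((PySem.List.pyGet? lines row).getD "").toList.getD i ' ').isDigit = true)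

instance (row : Int) (col : Int) (adjacent_numbers : List Int) (numbers : List String) (lines : List String) : Decidable (Pre_number_to_left row col adjacent_numbers numbers lines) := by
  unfold Pre_number_to_left; infer_instance

def pvWitness_number_to_left : Int × Int × List Int × List String × List String :=
  (0, 3, [7], ["4", "6", "7", "."], ["467.."])

def Spec_number_to_left (row : Int) (col : Int) (adjacent_numbers : List Int) (numbers : List String) (lines : List String) (out : List Int) : Prop := out = number_to_left_alt row col adjacent_numbers numbers lines
instance (row : Int) (col : Int) (adjacent_numbers : List Int) (numbers : List String) (lines : List String) (out : List Int) : Decidable (Spec_number_to_left row col adjacent_numbers numbers lines out) := by unfold Spec_number_to_left; infer_instance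

-- ===== CLAIM =====
def Claim_equal_number_to_left : Prop := ∀ (row : Int) (col : Int) (adjacent_numbers : List Int) (numbers : List String) (lines : List String), Dom_number_to_left row col adjacent_numbers numbers lines → Pre_number_to_left row col adjacent_numbers numbers lines → Spec_number_to_left row col adjacent_numbers numbers lines (number_to_left row col adjacent_numbers numbers lines)

-- ===== LEMMAS AND PROOFS =====

-- A's backward loop collects exactly the longest `numbers`-run read right-to-left
lemma ntlDigits_eq_takeWhile (cs : List Char) (numbers : List String) :
    ∀ c : Nat, c ≤ cs.length → ∀ acc,
      ntlDigits cs numbers (PySem.List.pyRange ((c : Int) - 1) (-1) (-1)) acc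
        = acc ++ (cs.take c).reverse.takeWhile (memNum numbers) := by
  intro c
  induction c with
  | zero =>
    intro _ acc
    rw [PySem.List.pyRange_neg_one_eq_nil (by omega)]
    simp [ntlDigits]
  | succ k ih =>
    intro hle acc
    have hk : k < cs.length := by omega
    rw [PySem.List.pyRange_neg_one_cons (by omega)]
    have hidx : ((k+1 : Nat) : Int) - 1 = (k : Int) := by push_cast; ring
    rw [hidx]
    have hget : PySem.List.pyGet? cs (k : Int) = some cs[k] := by
      rw [PySem.List.pyGet?_natCast]; simp [hk]
    rw [List.take_succ_eq_append_getElem hk]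
    simp only [ntlDigits, hget, List.reverse_append, List.reverse_cons, List.reverse_nil,
      List.nil_append, List.singleton_append, List.takeWhile_cons]
    by_cases hm : memNum numbers cs[k]
    · simp only [hm]
      have : (k : Int) - 1 = ((k : Nat) : Int) - 1 := by ring
      rw [ih (by omega) (acc ++ [cs[k]])]
      simp
    · simp [hm]

-- the positional-power sum is the Horner fold
lemma ntlValue_eq_horner (ds : List Char) :
    ntlValue ds = ds.foldl (fun v ch => 10 * v + intChar ch) 0 := by
  induction ds using List.reverseRecOn with
  | nil => simp [ntlValue, PySem.List.pyRange_one_eq_nil]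
  | append_singleton ds c ih =>
    unfold ntlValue
    rw [List.foldl_append]
    have hlen : ((ds ++ [c]).length : Int) = (ds.length : Int) + 1 := by simp
    have hsplit : PySem.List.pyRange 0 ((ds ++ [c]).length) 1
        = PySem.List.pyRange 0 (ds.length) 1 ++ [((ds.length : Nat) : Int)] := by
      rw [show (((ds ++ [c]).length : Nat) : Int) = ((ds.length : Nat) : Int) + 1 by simp]
      rw [PySem.List.pyRange_one_succ_right (by positivity)]
    rw [hsplit, List.foldl_append]
    rw [PySem.List.foldl_add, PySem.List.foldl_add]
    simp only [List.foldl_cons, List.foldl_nil]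
    have hterm : intChar ((PySem.List.pyGet? (ds ++ [c]) ((ds.length : Nat) : Int)).getD ' ')
        * 10 ^ ((((ds ++ [c]).length : Int) - ((ds.length : Nat) : Int) - 1).toNat) = intChar c := by
      rw [show (ds ++ [c] : List Char) = ds ++ c :: [] by simp, PySem.List.pyGet?_append_length]
      simp
    have hmap : (PySem.List.pyRange 0 (ds.length) 1).map
          (fun d => intChar ((PySem.List.pyGet? (ds ++ [c]) d).getD ' ')
             * 10 ^ ((((ds ++ [c]).length : Int) - d - 1).toNat))
        = (PySem.List.pyRange 0 (ds.length) 1).map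
          (fun d => 10 * (intChar ((PySem.List.pyGet? ds d).getD ' ')
             * 10 ^ (((ds.length : Int) - d - 1).toNat))) := by
      apply List.map_congr_left
      intro d hd
      rw [PySem.List.mem_pyRange_one] at hd
      obtain ⟨h0, hd⟩ := hd
      have hget : PySem.List.pyGet? (ds ++ [c]) d = PySem.List.pyGet? ds d := by
        rw [PySem.List.pyGet?_of_nonneg _ h0, PySem.List.pyGet?_of_nonneg _ h0]
        rw [List.getElem?_append_left (by omega)]
      rw [hget, hlen]
      have hexp : (((ds.length : Int) + 1) - d - 1).toNat = (((ds.length : Int)) - d - 1).toNat + 1 := by omega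
      rw [hexp, pow_succ]
      ring
    rw [hmap]
    simp only [List.map_cons, List.map_nil, List.sum_cons, List.sum_nil, add_zero]
    rw [hterm]
    rw [List.sum_map_mul_left]
    rw [← ih]
    unfold ntlValue
    rw [PySem.List.foldl_add]
    ring

-- B's forward pass: `start` lands one past the last non-member character
lemma start_fold_eq (numbers : List String) (p : List Char) :
    (PySem.List.enumerate p).foldl
        (fun start q => if memNum numbers q.2 = false then q.1 + 1 else start) 0
      = (p.length : Int) - ((p.reverse.takeWhile (memNum numbers)).length : Int) := by
  induction p using List.reverseRecOn with
  | nil => simp [PySem.List.enumerate]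
  | append_singleton p c ih =>
    rw [PySem.List.enumerate_append, List.foldl_append]
    simp only [List.reverse_append, List.reverse_cons, List.reverse_nil, List.nil_append,
      List.singleton_append, List.takeWhile_cons]
    by_cases hm : memNum numbers c
    · simp [hm, ih, PySem.List.enumerate]
    · simp only [Bool.not_eq_true] at hm
      simp [PySem.List.enumerate, hm]

lemma takeWhile_len_le (l : List Char) (q : Char → Bool) : (l.takeWhile q).length ≤ l.length :=
  (List.takeWhile_prefix q).length_le

lemma drop_eq_rev_takeWhile (p : List Char) (q : Char → Bool) :
    p.drop (p.length - (p.reverse.takeWhile q).length) = (p.reverse.takeWhile q).reverse := by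
  conv_rhs => rw [List.prefix_iff_eq_take.mp (List.takeWhile_prefix q), List.reverse_take]
  simp

-- ===== VERDICT =====
theorem number_to_left_spec : Claim_equal_number_to_left := by
  intro row col adj numbers lines _ hPre
  unfold Spec_number_to_left
  by_cases hc : col > 0
  case neg => simp [number_to_left, number_to_left_alt, hc]
  obtain ⟨hsome, hlen, hdig⟩ := hPre hc
  obtain ⟨lineRow, hline⟩ := Option.isSome_iff_exists.mp hsome
  rw [hline] at hlen
  simp only [Option.getD_some] at hlen
  set t := (col - 1).toNat with ht
  have htn : t < lineRow.toList.length := hlen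
  have hcol1 : col - 1 = (t : Int) := by omega
  have hget : PySem.Str.pyGet? lineRow (col - 1) = some lineRow.toList[t] := by
    rw [hcol1, PySem.Str.pyGet?_natCast]
    exact List.getElem?_eq_getElem htn
  have hp : PySem.List.slice lineRow.toList none (some col) = lineRow.toList.take (t + 1) := by
    rw [PySem.List.slice_to _ (by omega)]
    congr 1
    omega
  have hplen : (lineRow.toList.take (t + 1)).length = t + 1 := by
    rw [List.length_take]
    omega
  have hprev : (lineRow.toList.take (t + 1)).reverse
      = lineRow.toList[t] :: (lineRow.toList.take t).reverse := by
    rw [List.take_succ_eq_append_getElem htn]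
    simp
  have hstart := start_fold_eq numbers (lineRow.toList.take (t + 1))
  simp only [number_to_left, number_to_left_alt, hc, if_true, hline, hget, hp]
  by_cases hm : memNum numbers lineRow.toList[t]
  · -- a number ends at col-1 : both append the same value
    simp only [hm, if_true]
    have hdigits : ntlDigits lineRow.toList numbers (PySem.List.pyRange (col - 1) (-1) (-1)) []
        = (lineRow.toList.take (t + 1)).reverse.takeWhile (memNum numbers) := by
      have h1 : col - 1 = ((t + 1 : Nat) : Int) - 1 := by omega
      rw [h1, ntlDigits_eq_takeWhile lineRow.toList numbers (t + 1) (by omega) []]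
      simp
    have hrle : ((lineRow.toList.take (t + 1)).reverse.takeWhile (memNum numbers)).length
        ≤ (lineRow.toList.take (t + 1)).length := by
      have := takeWhile_len_le (lineRow.toList.take (t + 1)).reverse (memNum numbers)
      simpa using this
    have hrpos : 0 < ((lineRow.toList.take (t + 1)).reverse.takeWhile (memNum numbers)).length := by
      rw [hprev, List.takeWhile_cons_of_pos hm]
      simp
    rw [hstart, if_pos (by omega)]
    have hslice : PySem.List.slice (lineRow.toList.take (t + 1))
          (some (((lineRow.toList.take (t + 1)).length : Int)
            - (((lineRow.toList.take (t + 1)).reverse.takeWhile (memNum numbers)).length : Int))) none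
        = ((lineRow.toList.take (t + 1)).reverse.takeWhile (memNum numbers)).reverse := by
      rw [PySem.List.slice_from _ (by omega)]
      rw [show ((((lineRow.toList.take (t + 1)).length : Int)
            - (((lineRow.toList.take (t + 1)).reverse.takeWhile (memNum numbers)).length : Int))).toNat
            = (lineRow.toList.take (t + 1)).length
              - ((lineRow.toList.take (t + 1)).reverse.takeWhile (memNum numbers)).length by omega]
      exact drop_eq_rev_takeWhile (lineRow.toList.take (t + 1)) (memNum numbers)
    rw [hslice, hdigits, ntlValue_eq_horner]
  · -- no number ends at col-1 : both return the list unchanged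
    simp only [Bool.not_eq_true] at hm
    simp only [hm, Bool.false_eq_true, if_false]
    rw [hstart, hprev, List.takeWhile_cons_of_neg (by simp [hm])]
    rw [if_neg (by simp)]
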